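-- pv_equiv track=rewrite | github.com/great-history/gui-rixs | edrixs/utils.py | slater_integrals_name
-- ===== SOURCE A (Python) =====
-- def info_atomic_shell():
--
--     info = {'s':   (0, 2),
--             'p':   (1, 6),
--             'p12': (1, 2),
--             'p32': (1, 4),
--             't2g': (2, 6),
--             'd':   (2, 10),
--             'd32': (2, 4),
--             'd52': (2, 6),
--             'f':   (3, 14),
--             'f52': (3, 6),
--             'f72': (3, 8)
--             }
--
--     return info
--
-- def slater_integrals_name(shell_name, label=None):
--
--     info = info_atomic_shell()
--     # one shell
--     if len(shell_name) == 1: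
--         res = []
--         l1 = info[shell_name[0]][0]
--         if label is not None:
--             x = label[0]
--         else:
--             x = '1'
--         res.extend(['F' + str(i) + '_' + x + x for i in range(0, 2*l1+1, 2)])
--     elif len(shell_name) == 2:
--         res = []
--         l1 = info[shell_name[0]][0]
--         l2 = info[shell_name[1]][0]
--         if label is not None:
--             x, y = label[0], label[1]
--         else:
--             x, y = '1', '2'
--         res.extend(['F' + str(i) + '_' + x + x for i in range(0, 2*l1+1, 2)])
--         res.extend(['F' + str(i) + '_' + x + y for i in range(0, min(2*l1, 2*l2)+1, 2)])
--         res.extend(['G' + str(i) + '_' + x + y for i in range(abs(l1-l2), l1+l2+1, 2)])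
--         res.extend(['F' + str(i) + '_' + y + y for i in range(0, 2*l2+1, 2)])
--     elif len(shell_name) == 3:
--         res = []
--         l1 = info[shell_name[0]][0]
--         l2 = info[shell_name[1]][0]
--         l3 = info[shell_name[2]][0]
--         if label is not None:
--             x, y, z = label[0], label[1], label[2]
--         else:
--             x, y, z = '1', '2', '3'
--         res.extend(['F' + str(i) + '_' + x + x for i in range(0, 2*l1+1, 2)])
--         res.extend(['F' + str(i) + '_' + x + y for i in range(0, min(2*l1, 2*l2)+1, 2)])
--         res.extend(['G' + str(i) + '_' + x + y for i in range(abs(l1-l2), l1+l2+1, 2)])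
--         res.extend(['F' + str(i) + '_' + y + y for i in range(0, 2*l2+1, 2)])
--         res.extend(['F' + str(i) + '_' + x + z for i in range(0, min(2*l1, 2*l3)+1, 2)])
--         res.extend(['G' + str(i) + '_' + x + z for i in range(abs(l1-l3), l1+l3+1, 2)])
--         res.extend(['F' + str(i) + '_' + y + z for i in range(0, min(2*l2, 2*l3)+1, 2)])
--         res.extend(['G' + str(i) + '_' + y + z for i in range(abs(l2-l3), l2+l3+1, 2)])
--         res.extend(['F' + str(i) + '_' + z + z for i in range(0, 2*l3+1, 2)])
--     else:
--         raise Exception("Not implemented for this case: ", shell_name)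
--
--     return res
-- ===== SOURCE B (Python) =====
-- def info_atomic_shell():
--
--     info = {'s':   (0, 2),
--             'p':   (1, 6),
--             'p12': (1, 2),
--             'p32': (1, 4),
--             't2g': (2, 6),
--             'd':   (2, 10),
--             'd32': (2, 4),
--             'd52': (2, 6),
--             'f':   (3, 14),
--             'f52': (3, 6),
--             'f72': (3, 8)
--             }
--
--     return info
--
-- def slater_integrals_name(shell_name, label=None):
--     n = len(shell_name)
--     if n not in (1, 2, 3):
--         raise Exception("Not implemented for this case: ", shell_name)
--     info = info_atomic_shell()
--     ls = [info[s][0] for s in shell_name]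
--     labels = label if label is not None else ['1', '2', '3']
--     res = []
--     for j in range(n):
--         for i in range(j):
--             res += ['F' + str(k) + '_' + labels[i] + labels[j]
--                     for k in range(0, min(2 * ls[i], 2 * ls[j]) + 1, 2)]
--             res += ['G' + str(k) + '_' + labels[i] + labels[j]
--                     for k in range(abs(ls[i] - ls[j]), ls[i] + ls[j] + 1, 2)]
--         res += ['F' + str(k) + '_' + labels[j] + labels[j]
--                 for k in range(0, 2 * ls[j] + 1, 2)]
--     return res
-- ===== Notes on version B (the rewrite author's own statement) =====
-- stated objective: simpler
-- what changed: Replaces the three hard-coded per-length branches (with their duplicated extend blocks) by one generic nested loop over shell pairs that emits F/G terms from a precomputed l-value list and label list, guarded by the same length check.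
import Mathlib
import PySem

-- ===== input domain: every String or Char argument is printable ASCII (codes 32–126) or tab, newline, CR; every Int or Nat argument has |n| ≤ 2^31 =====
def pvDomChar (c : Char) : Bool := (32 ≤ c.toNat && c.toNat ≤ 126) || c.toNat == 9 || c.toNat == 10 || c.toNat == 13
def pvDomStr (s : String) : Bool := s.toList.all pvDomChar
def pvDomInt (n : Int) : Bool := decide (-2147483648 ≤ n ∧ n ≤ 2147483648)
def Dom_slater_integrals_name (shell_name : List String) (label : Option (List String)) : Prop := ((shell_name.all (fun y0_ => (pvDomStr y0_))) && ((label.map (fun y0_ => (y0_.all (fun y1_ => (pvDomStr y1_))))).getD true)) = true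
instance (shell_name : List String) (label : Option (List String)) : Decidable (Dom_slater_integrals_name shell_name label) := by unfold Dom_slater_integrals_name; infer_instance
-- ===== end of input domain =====

-- B replaces A's three hard-coded per-length branches by one generic nested loop over
-- shell pairs driven by a precomputed l-value list and label list (objective: simpler).

-- shared module helper: port of info_atomic_shell (both Pythons call it)
def info_atomic_shell : PySem.Dict String (Int × Int) :=
  PySem.Dict.ofList
    [("s", (0, 2)), ("p", (1, 6)), ("p12", (1, 2)), ("p32", (1, 4)),
     ("t2g", (2, 6)), ("d", (2, 10)), ("d32", (2, 4)), ("d52", (2, 6)),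
     ("f", (3, 14)), ("f52", (3, 6)), ("f72", (3, 8))]

-- ===== PORT A =====
def slater_integrals_name (shell_name : List String) (label : Option (List String)) : List String :=
  let info := info_atomic_shell
  if shell_name.length = 1 then
    let l1 := ((info.get? ((PySem.List.pyGet? shell_name 0).getD "")).getD (0, 0)).1
    let x := match label with
      | some lb => (PySem.List.pyGet? lb 0).getD ""
      | none => "1"
    (PySem.List.pyRange 0 (2*l1+1) 2).map (fun i => "F" ++ PySem.Int.toStr i ++ "_" ++ x ++ x)
  else if shell_name.length = 2 then
    let l1 := ((info.get? ((PySem.List.pyGet? shell_name 0).getD "")).getD (0, 0)).1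
    let l2 := ((info.get? ((PySem.List.pyGet? shell_name 1).getD "")).getD (0, 0)).1
    let x := match label with
      | some lb => (PySem.List.pyGet? lb 0).getD ""
      | none => "1"
    let y := match label with
      | some lb => (PySem.List.pyGet? lb 1).getD ""
      | none => "2"
    (PySem.List.pyRange 0 (2*l1+1) 2).map (fun i => "F" ++ PySem.Int.toStr i ++ "_" ++ x ++ x)
    ++ (PySem.List.pyRange 0 (min (2*l1) (2*l2) + 1) 2).map (fun i => "F" ++ PySem.Int.toStr i ++ "_" ++ x ++ y)
    ++ (PySem.List.pyRange |l1 - l2| (l1+l2+1) 2).map (fun i => "G" ++ PySem.Int.toStr i ++ "_" ++ x ++ y)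
    ++ (PySem.List.pyRange 0 (2*l2+1) 2).map (fun i => "F" ++ PySem.Int.toStr i ++ "_" ++ y ++ y)
  else if shell_name.length = 3 then
    let l1 := ((info.get? ((PySem.List.pyGet? shell_name 0).getD "")).getD (0, 0)).1
    let l2 := ((info.get? ((PySem.List.pyGet? shell_name 1).getD "")).getD (0, 0)).1
    let l3 := ((info.get? ((PySem.List.pyGet? shell_name 2).getD "")).getD (0, 0)).1
    let x := match label with
      | some lb => (PySem.List.pyGet? lb 0).getD ""
      | none => "1"
    let y := match label with
      | some lb => (PySem.List.pyGet? lb 1).getD ""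
      | none => "2"
    let z := match label with
      | some lb => (PySem.List.pyGet? lb 2).getD ""
      | none => "3"
    (PySem.List.pyRange 0 (2*l1+1) 2).map (fun i => "F" ++ PySem.Int.toStr i ++ "_" ++ x ++ x)
    ++ (PySem.List.pyRange 0 (min (2*l1) (2*l2) + 1) 2).map (fun i => "F" ++ PySem.Int.toStr i ++ "_" ++ x ++ y)
    ++ (PySem.List.pyRange |l1 - l2| (l1+l2+1) 2).map (fun i => "G" ++ PySem.Int.toStr i ++ "_" ++ x ++ y)
    ++ (PySem.List.pyRange 0 (2*l2+1) 2).map (fun i => "F" ++ PySem.Int.toStr i ++ "_" ++ y ++ y)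
    ++ (PySem.List.pyRange 0 (min (2*l1) (2*l3) + 1) 2).map (fun i => "F" ++ PySem.Int.toStr i ++ "_" ++ x ++ z)
    ++ (PySem.List.pyRange |l1 - l3| (l1+l3+1) 2).map (fun i => "G" ++ PySem.Int.toStr i ++ "_" ++ x ++ z)
    ++ (PySem.List.pyRange 0 (min (2*l2) (2*l3) + 1) 2).map (fun i => "F" ++ PySem.Int.toStr i ++ "_" ++ y ++ z)
    ++ (PySem.List.pyRange |l2 - l3| (l2+l3+1) 2).map (fun i => "G" ++ PySem.Int.toStr i ++ "_" ++ y ++ z)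
    ++ (PySem.List.pyRange 0 (2*l3+1) 2).map (fun i => "F" ++ PySem.Int.toStr i ++ "_" ++ z ++ z)
  else []  -- Python A raises Exception here; excluded by Pre_

-- ===== PORT B =====
def slater_integrals_name_alt (shell_name : List String) (label : Option (List String)) : List String :=
  let n : Int := shell_name.length
  if n = 1 ∨ n = 2 ∨ n = 3 then
    let ls : List Int := shell_name.map (fun s => ((info_atomic_shell.get? s).getD (0, 0)).1)
    let labels : List String := label.getD ["1", "2", "3"]
    let li : Int → Int := fun i => (PySem.List.pyGet? ls i).getD 0
    let lab : Int → String := fun i => (PySem.List.pyGet? labels i).getD ""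
    (PySem.List.pyRange 0 n 1).foldl (fun res j =>
      ((PySem.List.pyRange 0 j 1).foldl (fun r i =>
          r ++ (PySem.List.pyRange 0 (min (2 * li i) (2 * li j) + 1) 2).map
                 (fun k => "F" ++ PySem.Int.toStr k ++ "_" ++ lab i ++ lab j)
            ++ (PySem.List.pyRange |li i - li j| (li i + li j + 1) 2).map
                 (fun k => "G" ++ PySem.Int.toStr k ++ "_" ++ lab i ++ lab j)) res)
      ++ (PySem.List.pyRange 0 (2 * li j + 1) 2).map
           (fun k => "F" ++ PySem.Int.toStr k ++ "_" ++ lab j ++ lab j)) []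
  else []  -- Source B raises the same Exception here; excluded by Pre_

-- ===== PRECONDITION & SPEC =====
-- Pre_ excludes exactly the inputs where Python A raises: length not in {1,2,3}
-- (explicit Exception), a shell name that is not a key of info_atomic_shell (KeyError),
-- or a provided label list shorter than shell_name (IndexError).
def Pre_slater_integrals_name (shell_name : List String) (label : Option (List String)) : Prop :=
  (shell_name.length = 1 ∨ shell_name.length = 2 ∨ shell_name.length = 3) ∧
  (∀ s ∈ shell_name, s ∈ ["s", "p", "p12", "p32", "t2g", "d", "d32", "d52", "f", "f52", "f72"]) ∧
  (∀ L, label = some L → shell_name.length ≤ L.length)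
instance (shell_name : List String) (label : Option (List String)) : Decidable (Pre_slater_integrals_name shell_name label) := by unfold Pre_slater_integrals_name; infer_instance

def pvWitness_slater_integrals_name : List String × Option (List String) := (["d", "p"], some ["a", "b"])

def Spec_slater_integrals_name (shell_name : List String) (label : Option (List String)) (out : List String) : Prop := out = slater_integrals_name_alt shell_name label
instance (shell_name : List String) (label : Option (List String)) (out : List String) : Decidable (Spec_slater_integrals_name shell_name label out) := by unfold Spec_slater_integrals_name; infer_instance

-- ===== CLAIM (what is proved, stated in full; the proofs are below) =====
def Claim_equal_slater_integrals_name : Prop := ∀ (shell_name : List String) (label : Option (List String)), Dom_slater_integrals_name shell_name label → Pre_slater_integrals_name shell_name label → Spec_slater_integrals_name shell_name label (slater_integrals_name shell_name label)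

-- ===== LEMMAS AND PROOFS =====

-- ===== VERDICT (by name: the statement is the Claim_ definition above) =====
theorem slater_integrals_name_spec : Claim_equal_slater_integrals_name := by
  intro sn label _ pre
  obtain ⟨hlen, -, -⟩ := pre
  unfold Spec_slater_integrals_name
  have h1 : PySem.List.pyRange 0 1 1 = [0] := by decide
  have h2 : PySem.List.pyRange 0 2 1 = [0, 1] := by decide
  have h3 : PySem.List.pyRange 0 3 1 = [0, 1, 2] := by decide
  have h0 : PySem.List.pyRange 0 0 1 = [] := by decide
  rcases sn with _ | ⟨a, _ | ⟨b, _ | ⟨c, _ | ⟨d, t⟩⟩⟩⟩ <;>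
    simp only [List.length] at hlen <;> try omega
  all_goals cases label with
  | none =>
      simp [slater_integrals_name, slater_integrals_name_alt, h0, h1, h2, h3,
            PySem.List.pyGet?, PySem.List.pyIdx?, List.append_assoc]
  | some L =>
      simp [slater_integrals_name, slater_integrals_name_alt, h0, h1, h2, h3,
            PySem.List.pyGet?, PySem.List.pyIdx?, List.append_assoc]
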